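-- pv_equiv track=rewrite | github.com/Zocker1999NET/entertainment-decider | server/entertainment_decider/common/_itertools.py | iter_lookahead
-- ===== SOURCE A (Python) =====
-- from typing import (
--     Iterable,
--     Iterator,
--     List,
--     Literal,
--     Tuple,
--     TypeVar,
--     overload,
-- )
--
-- T = TypeVar("T")
--
-- def iter_lookahead(
--     iterable: Iterable[T],
--     get_first: bool = False,
--     get_last: bool = False,
-- ) -> Iterable[Tuple[None, T] | Tuple[T, T] | Tuple[T, None]]:
--     """
--     allows iterating over <iterable> while also getting the last/next item
--
--     The pairs are given as a Tuple and so can be split: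
--     ```python
--     for last, cur in iter_lookahead(iterable): ...
--     ```
--
--     The behavior for the border cases can be configured.
--     If <get_first> is True, the first tuple will be `(None, last)`.
--     If <get_last> is True, the last tuple will be `(cur, None)`.
--     Otherwise, both values will be set at the borders respectively.
--     See the docstrings for the overloaded methods.
--     """
--     it = iter(iterable)
--     last = next(it)
--     if get_first:
--         yield None, last
--     for cur in it:
--         yield last, cur
--         last = cur
--     if get_last:
--         yield last, None
-- ===== SOURCE B (Python) =====
-- def iter_lookahead(iterable, get_first=False, get_last=False):
--     it = iter(iterable)
--     first = next(it)  # empty input: StopIteration -> RuntimeError, as in A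
--     xs = [first] + list(it)
--     if get_first:
--         yield None, first
--     yield from zip(xs, xs[1:])
--     if get_last:
--         yield xs[-1], None
-- ===== Notes on version B (the rewrite author's own statement) =====
-- stated objective: idiomatic
-- what changed: Replaces the hand-carried 'last' variable loop by materialising the items once and pairing them with zip(xs, xs[1:]); the border pairs read first and the final element directly.
import Mathlib
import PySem

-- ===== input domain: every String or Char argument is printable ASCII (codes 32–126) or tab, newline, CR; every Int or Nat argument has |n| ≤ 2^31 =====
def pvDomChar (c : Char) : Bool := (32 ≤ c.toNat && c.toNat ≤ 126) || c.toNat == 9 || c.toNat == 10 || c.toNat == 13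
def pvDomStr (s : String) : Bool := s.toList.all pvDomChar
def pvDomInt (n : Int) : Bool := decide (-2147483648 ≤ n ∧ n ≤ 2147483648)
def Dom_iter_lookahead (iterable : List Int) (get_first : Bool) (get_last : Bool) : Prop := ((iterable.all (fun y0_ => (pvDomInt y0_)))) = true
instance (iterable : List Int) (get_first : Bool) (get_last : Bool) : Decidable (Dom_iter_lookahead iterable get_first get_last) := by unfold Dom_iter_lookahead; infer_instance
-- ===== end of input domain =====

-- B replaces A's hand-carried 'last' loop by zipping the materialised list with its tail (idiomatic, same O(n)).


-- ===== PORT A =====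
-- A's generator loop: carries 'last', yields (last, cur) per step, then the optional tail pair.
def iterLookaheadLoopA (last : Int) (rest : List Int) (get_last : Bool) : List (Option Int × Option Int) :=
  match rest with
  | [] => if get_last then [(some last, none)] else []
  | cur :: cs => (some last, some cur) :: iterLookaheadLoopA cur cs get_last

def iter_lookahead (iterable : List Int) (get_first : Bool) (get_last : Bool) : List (Option Int × Option Int) :=
  match iterable with
  | [] => []  -- unreachable under Pre_: Python raises RuntimeError (StopIteration in generator) here
  | first :: rest =>
    (if get_first then [(none, some first)] else []) ++ iterLookaheadLoopA first rest get_last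

-- ===== PORT B =====
def iter_lookahead_alt (iterable : List Int) (get_first : Bool) (get_last : Bool) : List (Option Int × Option Int) :=
  match iterable with
  | [] => []  -- unreachable under Pre_: Python raises RuntimeError here
  | first :: rest =>
    let xs := first :: rest
    (if get_first then [(none, some first)] else []) ++
    (List.zip xs xs.tail).map (fun p => (some p.1, some p.2)) ++
    (if get_last then [(some (xs.getLastD 0), none)] else [])

-- ===== PRECONDITION & SPEC =====
-- Pre_ excludes exactly the empty list, on which both Pythons raise RuntimeError (StopIteration in a generator).
def Pre_iter_lookahead (iterable : List Int) (get_first : Bool) (get_last : Bool) : Prop := iterable ≠ []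
instance (iterable : List Int) (get_first : Bool) (get_last : Bool) : Decidable (Pre_iter_lookahead iterable get_first get_last) := by unfold Pre_iter_lookahead; infer_instance
def pvWitness_iter_lookahead : List Int × Bool × Bool := ([1, 2, 3], true, true)

def Spec_iter_lookahead (iterable : List Int) (get_first : Bool) (get_last : Bool) (out : List (Option Int × Option Int)) : Prop := out = iter_lookahead_alt iterable get_first get_last
instance (iterable : List Int) (get_first : Bool) (get_last : Bool) (out : List (Option Int × Option Int)) : Decidable (Spec_iter_lookahead iterable get_first get_last out) := by unfold Spec_iter_lookahead; infer_instance

-- ===== CLAIM (what is proved, stated in full; the proofs are below) =====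
def Claim_equal_iter_lookahead : Prop := ∀ (iterable : List Int) (get_first : Bool) (get_last : Bool), Dom_iter_lookahead iterable get_first get_last → Pre_iter_lookahead iterable get_first get_last → Spec_iter_lookahead iterable get_first get_last (iter_lookahead iterable get_first get_last)

-- ===== LEMMAS AND PROOFS =====
theorem iterLookaheadLoopA_eq (rest : List Int) (last : Int) (get_last : Bool) :
    iterLookaheadLoopA last rest get_last =
      (List.zip (last :: rest) rest).map (fun p => (some p.1, some p.2)) ++
      (if get_last then [(some ((last :: rest).getLastD 0), none)] else []) := by
  induction rest generalizing last with
  | nil => simp [iterLookaheadLoopA]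
  | cons c cs ih => simp [iterLookaheadLoopA, ih c]

-- ===== VERDICT (by name: the statement is the Claim_ definition above) =====
theorem iter_lookahead_spec : Claim_equal_iter_lookahead := by
  intro iterable get_first get_last _ hpre
  match iterable with
  | [] => exact absurd rfl hpre
  | first :: rest =>
    show _ = _
    simp only [iter_lookahead, iter_lookahead_alt, iterLookaheadLoopA_eq, List.tail_cons,
      List.append_assoc]
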